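-- pv_equiv track=rewrite | github.com/CoJeAndy/bachelors-thesis | src/data_analysis.py | get_substitution_errors
-- ===== SOURCE A (Python) =====
-- from typing import Dict, List
--
-- basic_letters = 'abcdefghijklmnopqrstuvwxyz'
--
-- substitution_dict = {'q': 'wa', 'w': 'qes', 'e': 'wrd', 'r': 'etf', 't':'rzg', 'z': 'tuh', 'u': 'zij', 'i': 'uok', 'o': 'ipl',
--                      'p': 'o', 'a': 'sqy', 's': 'adwx', 'd':'sfec', 'f':'dgrv', 'g': 'fhtb', 'h': 'gjzn',
--                      'j': 'hkum', 'k': 'jli', 'l': 'ko', 'y':'xa', 'x': 'ycs', 'c':'xvd', 'v':'cbf', 'b':'vng',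
--                      'n': 'bmh', 'm':'nj'}
--
-- def get_substitution_errors(char_errors: Dict[str, Dict[str, int]]) -> tuple[int, int]:
--     """compute substitution errors
--
--     Args:
--         char_errors (Dict[str, Dict[str, int]]): error dictionary {char: {total: all_errors, mistake_char: number_errors ...}}
--
--     Returns:
--         tuple[int, int]: total errors, substitution errors
--     """
--     total_substitution_errors = 0
--     total_basic_letters_errors = 0
--     for char in basic_letters:
--         if not char_errors.get(char, {}):
--             continue
--         total_basic_letters_errors += sum([char_errors[char].get(error, 0) for error in basic_letters])
--         for error in substitution_dict[char]:
--             total_substitution_errors += char_errors[char].get(error, 0)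
--     return total_basic_letters_errors, total_substitution_errors
-- ===== SOURCE B (Python) =====
-- basic_letters = 'abcdefghijklmnopqrstuvwxyz'
--
-- substitution_dict = {'q': 'wa', 'w': 'qes', 'e': 'wrd', 'r': 'etf', 't':'rzg', 'z': 'tuh', 'u': 'zij', 'i': 'uok', 'o': 'ipl',
--                      'p': 'o', 'a': 'sqy', 's': 'adwx', 'd':'sfec', 'f':'dgrv', 'g': 'fhtb', 'h': 'gjzn',
--                      'j': 'hkum', 'k': 'jli', 'l': 'ko', 'y':'xa', 'x': 'ycs', 'c':'xvd', 'v':'cbf', 'b':'vng',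
--                      'n': 'bmh', 'm':'nj'}
--
-- def get_substitution_errors(char_errors):
--     """Single pass over the recorded errors instead of a scan of the fixed alphabet."""
--     basic = set(basic_letters)
--     total_basic_letters_errors = 0
--     total_substitution_errors = 0
--     for char, inner in char_errors.items():
--         if char in basic:
--             neigh = set(substitution_dict[char])
--             for error, count in inner.items():
--                 if error in basic:
--                     total_basic_letters_errors += count
--                 if error in neigh:
--                     total_substitution_errors += count
--     return total_basic_letters_errors, total_substitution_errors
-- ===== Notes on version B (the rewrite author's own statement) =====
-- stated objective: alternative
-- what changed: B makes a single pass over the recorded error dict itself (skipping non-letter keys, testing each error key against precomputed letter/neighbor sets) instead of A's scan of the fixed alphabet with repeated dict lookups and an inner alphabet comprehension per letter.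
import Mathlib
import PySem

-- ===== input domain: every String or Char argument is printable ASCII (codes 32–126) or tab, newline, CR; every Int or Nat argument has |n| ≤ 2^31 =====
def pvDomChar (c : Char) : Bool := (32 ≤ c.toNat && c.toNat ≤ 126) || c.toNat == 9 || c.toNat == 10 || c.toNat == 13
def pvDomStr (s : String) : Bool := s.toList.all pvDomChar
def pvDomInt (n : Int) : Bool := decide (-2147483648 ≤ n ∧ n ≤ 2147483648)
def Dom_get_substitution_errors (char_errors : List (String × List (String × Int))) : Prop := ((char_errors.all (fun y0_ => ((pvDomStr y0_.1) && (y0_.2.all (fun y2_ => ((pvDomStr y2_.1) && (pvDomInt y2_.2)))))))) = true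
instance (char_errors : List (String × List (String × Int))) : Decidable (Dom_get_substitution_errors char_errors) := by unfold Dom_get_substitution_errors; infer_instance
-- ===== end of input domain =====

-- B re-traverses the input dict once instead of scanning the fixed alphabet with repeated lookups (objective: alternative decomposition, same results).
-- Module-level constants shared by both Pythons:
def basic_letters : String := "abcdefghijklmnopqrstuvwxyz"

def substitution_dict : PySem.Dict String String := PySem.Dict.mk
  [("q", "wa"), ("w", "qes"), ("e", "wrd"), ("r", "etf"), ("t", "rzg"), ("z", "tuh"), ("u", "zij"),
   ("i", "uok"), ("o", "ipl"), ("p", "o"), ("a", "sqy"), ("s", "adwx"), ("d", "sfec"), ("f", "dgrv"),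
   ("g", "fhtb"), ("h", "gjzn"), ("j", "hkum"), ("k", "jli"), ("l", "ko"), ("y", "xa"), ("x", "ycs"),
   ("c", "xvd"), ("v", "cbf"), ("b", "vng"), ("n", "bmh"), ("m", "nj")]

-- ===== PORT A =====
-- A iterates the alphabet; `char_errors.get(char, {})` falsy (absent or empty inner dict) skips the letter.
-- `substitution_dict[char]` is looked up with getD "": every basic letter is a key, so the KeyError branch is unreachable.
def get_substitution_errors (char_errors : List (String × List (String × Int))) : Int × Int :=
  basic_letters.toList.foldl
    (fun (acc : Int × Int) (c : Char) =>
      match (PySem.Dict.mk char_errors).get? (String.ofList [c]) with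
      | none => acc
      | some inner =>
        if inner = [] then acc
        else
          let tb := acc.1 + (basic_letters.toList.map
            (fun e => (PySem.Dict.mk inner).getD (String.ofList [e]) 0)).sum
          let ts := (substitution_dict.getD (String.ofList [c]) "").toList.foldl
            (fun (s : Int) e => s + (PySem.Dict.mk inner).getD (String.ofList [e]) 0) acc.2
          (tb, ts))
    (0, 0)

-- ===== PORT B =====
-- B makes one pass over char_errors.items(); membership tests go against set(basic_letters) and
-- set(substitution_dict[char]) (the [char] lookup only happens for basic letters, so getD "" is exact).
def get_substitution_errors_alt (char_errors : List (String × List (String × Int))) : Int × Int :=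
  let basic : PySem.Set String := PySem.Set.ofList (basic_letters.toList.map (fun c => String.ofList [c]))
  char_errors.foldl
    (fun (acc : Int × Int) (kv : String × List (String × Int)) =>
      if kv.1 ∈ basic then
        let neigh : PySem.Set String :=
          PySem.Set.ofList ((substitution_dict.getD kv.1 "").toList.map (fun c => String.ofList [c]))
        kv.2.foldl
          (fun (a : Int × Int) (ev : String × Int) =>
            let a1 := if ev.1 ∈ basic then a.1 + ev.2 else a.1
            let a2 := if ev.1 ∈ neigh then a.2 + ev.2 else a.2
            (a1, a2)) acc
      else acc)
    (0, 0)

-- ===== PRECONDITION & SPEC =====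
-- Pre_ excludes association lists with duplicate keys (outer or in an inner dict): such lists
-- represent no Python dict, so A's first-match lookups and B's full traversal need not agree there.
def Pre_get_substitution_errors (char_errors : List (String × List (String × Int))) : Prop :=
  (char_errors.map Prod.fst).Nodup ∧ ∀ p ∈ char_errors, (p.2.map Prod.fst).Nodup
instance (char_errors : List (String × List (String × Int))) : Decidable (Pre_get_substitution_errors char_errors) := by unfold Pre_get_substitution_errors; infer_instance

def pvWitness_get_substitution_errors : (List (String × List (String × Int))) :=
  [("a", [("s", 2), ("total", 7), ("b", 1)]), ("total", [("s", 3)]), ("p", [])]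

def Spec_get_substitution_errors (char_errors : List (String × List (String × Int))) (out : Int × Int) : Prop := out = get_substitution_errors_alt char_errors
instance (char_errors : List (String × List (String × Int))) (out : Int × Int) : Decidable (Spec_get_substitution_errors char_errors out) := by unfold Spec_get_substitution_errors; infer_instance

-- ===== CLAIM (what is proved, stated in full; the proofs are below) =====
def Claim_equal_get_substitution_errors : Prop := ∀ (char_errors : List (String × List (String × Int))), Dom_get_substitution_errors char_errors → Pre_get_substitution_errors char_errors → Spec_get_substitution_errors char_errors (get_substitution_errors char_errors)

-- ===== LEMMAS AND PROOFS =====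

theorem pv_witness_ok : Dom_get_substitution_errors pvWitness_get_substitution_errors ∧ Pre_get_substitution_errors pvWitness_get_substitution_errors := by decide

-- abbreviations used only by the proofs
def chS (c : Char) : String := String.ofList [c]
def alphaL : List Char := basic_letters.toList
def basicS : List String := alphaL.map chS
def neighS (k : String) : List String := (substitution_dict.getD k "").toList.map chS
def aget (l : List (String × Int)) (k : String) : Int := (PySem.Dict.mk l).getD k 0
def dget (ce : List (String × List (String × Int))) (k : String) : List (String × Int) :=
  (PySem.Dict.mk ce).getD k []
-- per-letter / per-entry contributions
def F1 (inner : List (String × Int)) : Int := (basicS.map (aget inner)).sum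
def F2 (c : Char) (inner : List (String × Int)) : Int := ((neighS (chS c)).map (aget inner)).sum
def G1 (inner : List (String × Int)) : Int :=
  (inner.map (fun ev => if ev.1 ∈ basicS then ev.2 else 0)).sum
def G2 (k : String) (inner : List (String × Int)) : Int :=
  (inner.map (fun ev => if ev.1 ∈ neighS k then ev.2 else 0)).sum

theorem aget_not_mem (l : List (String × Int)) (k : String) (h : k ∉ l.map Prod.fst) :
    aget l k = 0 := by
  induction l with
  | nil => rfl
  | cons p t ih =>
    simp only [List.map_cons, List.mem_cons, not_or] at h
    simp only [aget, PySem.Dict.getD, PySem.Dict.get?, List.find?] at *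
    have : (p.1 == k) = false := by simp [beq_eq_false_iff_ne]; exact fun hh => h.1 hh.symm
    rw [this]
    exact ih h.2

theorem aget_cons (p : String × Int) (t : List (String × Int)) (k : String) :
    aget (p :: t) k = if p.1 = k then p.2 else aget t k := by
  simp only [aget, PySem.Dict.getD, PySem.Dict.get?, List.find?]
  by_cases h : p.1 = k
  · simp [h]
  · have hb : (p.1 == k) = false := by simp [h]
    simp [hb, h]

theorem dget_cons (p : String × List (String × Int)) (t : List (String × List (String × Int)))
    (k : String) : dget (p :: t) k = if p.1 = k then p.2 else dget t k := by
  simp only [dget, PySem.Dict.getD, PySem.Dict.get?, List.find?]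
  by_cases h : p.1 = k
  · simp [h]
  · have hb : (p.1 == k) = false := by simp [h]
    simp [hb, h]

theorem dget_not_mem (t : List (String × List (String × Int))) (k : String)
    (h : k ∉ t.map Prod.fst) : dget t k = [] := by
  induction t with
  | nil => rfl
  | cons p t ih =>
    simp only [List.map_cons, List.mem_cons, not_or] at h
    rw [dget_cons, if_neg (fun hh => h.1 hh.symm)]
    exact ih h.2

theorem sum_map_add {α : Type} (l : List α) (f g : α → Int) :
    (l.map (fun x => f x + g x)).sum = (l.map f).sum + (l.map g).sum := by
  induction l with
  | nil => simp
  | cons x t ih => simp [ih]; ring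

theorem foldl_add_sum {α : Type} (l : List α) (g : α → Int) (a : Int) :
    l.foldl (fun s x => s + g x) a = a + (l.map g).sum := by
  induction l generalizing a with
  | nil => simp
  | cons x t ih => simp [ih]; ring

theorem pairFold {α : Type} (l : List α) (f1 f2 : α → Int) (acc : Int × Int) :
    l.foldl (fun (a : Int × Int) x => (a.1 + f1 x, a.2 + f2 x)) acc
      = (acc.1 + (l.map f1).sum, acc.2 + (l.map f2).sum) := by
  induction l generalizing acc with
  | nil => simp
  | cons x t ih => simp [ih]; constructor <;> ring

theorem foldl_step_congr {α β : Type} (l : List α) (f g : β → α → β) (a : β)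
    (h : ∀ b x, f b x = g b x) : l.foldl f a = l.foldl g a := by
  have : f = g := funext fun b => funext fun x => h b x
  rw [this]

-- sum of an indicator over a Nodup list of keys
theorem sum_ite_not_mem (ks : List String) (e : String) (v : Int) (h : e ∉ ks) :
    (ks.map (fun k => if k = e then v else 0)).sum = 0 := by
  apply List.sum_eq_zero
  intro x hx
  simp only [List.mem_map] at hx
  obtain ⟨k, hk, rfl⟩ := hx
  have hne : ¬ k = e := fun hh => h (hh ▸ hk)
  rw [if_neg hne]

theorem sum_ite_mem (ks : List String) (e : String) (v : Int) (hnd : ks.Nodup) :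
    (ks.map (fun k => if k = e then v else 0)).sum = if e ∈ ks then v else 0 := by
  induction ks with
  | nil => simp
  | cons a ks ih =>
    rw [List.nodup_cons] at hnd
    by_cases h : a = e
    · subst h
      simp only [List.map_cons, List.sum_cons, List.mem_cons, true_or, if_true]
      rw [sum_ite_not_mem ks a v hnd.1]; ring
    · simp only [List.map_cons, List.sum_cons, if_neg h, zero_add, ih hnd.2]
      have hne : e ≠ a := fun hh => h hh.symm
      simp [List.mem_cons, hne]

-- key lemma: alphabet-indexed lookups = entry-indexed indicators
theorem lookup_sum_eq (l : List (String × Int)) (ks : List String)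
    (hl : (l.map Prod.fst).Nodup) (hk : ks.Nodup) :
    (ks.map (fun k => aget l k)).sum = (l.map (fun ev => if ev.1 ∈ ks then ev.2 else 0)).sum := by
  induction l with
  | nil =>
    simp only [List.map_nil, List.sum_nil]
    apply List.sum_eq_zero
    intro x hx
    simp only [List.mem_map] at hx
    obtain ⟨k, _, rfl⟩ := hx
    rfl
  | cons p t ih =>
    rw [List.map_cons, List.nodup_cons] at hl
    have hstep : ∀ k, aget (p :: t) k = (if k = p.1 then p.2 else 0) + aget t k := by
      intro k
      rw [aget_cons]
      by_cases h : p.1 = k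
      · subst h
        rw [if_pos rfl, if_pos rfl, aget_not_mem t p.1 hl.1]; ring
      · rw [if_neg h, if_neg (fun hh => h hh.symm)]; ring
    simp only [hstep]
    rw [sum_map_add, sum_ite_mem ks p.1 p.2 hk, ih hl.2]
    simp only [List.map_cons, List.sum_cons]

-- indicator sum over the alphabet collapses to the (unique) matching letter
theorem alpha_ite_sum (cs : List Char) (k : String) (F : Char → Int) (G : String → Int)
    (hnd : (cs.map chS).Nodup) (hFG : ∀ c ∈ cs, F c = G (chS c)) :
    (cs.map (fun c => if chS c = k then F c else 0)).sum
      = if k ∈ cs.map chS then G k else 0 := by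
  induction cs with
  | nil => simp
  | cons c cs ih =>
    rw [List.map_cons, List.nodup_cons] at hnd
    by_cases h : chS c = k
    · simp only [List.map_cons, List.sum_cons, if_pos h]
      have hrest : (cs.map (fun c' => if chS c' = k then F c' else 0)).sum = 0 := by
        apply List.sum_eq_zero
        intro x hx
        simp only [List.mem_map] at hx
        obtain ⟨c', hc', rfl⟩ := hx
        have hne : ¬ chS c' = k := fun hh => hnd.1 (by rw [h, ← hh]; exact List.mem_map_of_mem hc')
        rw [if_neg hne]
      have hk : k ∈ chS c :: List.map chS cs := by rw [← h]; exact List.mem_cons_self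
      rw [hrest, hFG c List.mem_cons_self, if_pos hk, h]
      ring
    · simp only [List.map_cons, List.sum_cons, if_neg h, zero_add]
      rw [ih hnd.2 (fun c' hc' => hFG c' (List.mem_cons_of_mem _ hc'))]
      have hne : k ≠ chS c := fun hh => h hh.symm
      simp [List.mem_cons, hne]

-- the central bridge: alphabet scan with lookups = one pass over the entries
theorem main_sum_eq (ce : List (String × List (String × Int)))
    (F : Char → List (String × Int) → Int) (G : String → List (String × Int) → Int)
    (hF0 : ∀ c, F c [] = 0)
    (hFG : ∀ c ∈ alphaL, ∀ inner, (inner.map Prod.fst).Nodup → F c inner = G (chS c) inner)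
    (hG0 : ∀ k inner, k ∉ basicS → G k inner = 0)
    (hnd : (ce.map Prod.fst).Nodup) (hin : ∀ p ∈ ce, (p.2.map Prod.fst).Nodup) :
    (alphaL.map (fun c => F c (dget ce (chS c)))).sum = (ce.map (fun p => G p.1 p.2)).sum := by
  induction ce with
  | nil =>
    simp only [List.map_nil, List.sum_nil]
    apply List.sum_eq_zero
    intro x hx
    simp only [List.mem_map] at hx
    obtain ⟨c, _, rfl⟩ := hx
    exact hF0 c
  | cons p t ih =>
    rw [List.map_cons, List.nodup_cons] at hnd
    have hstep : ∀ c, F c (dget (p :: t) (chS c))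
        = (if chS c = p.1 then F c p.2 else 0) + F c (dget t (chS c)) := by
      intro c
      rw [dget_cons]
      by_cases h : p.1 = chS c
      · rw [if_pos h, if_pos h.symm, dget_not_mem t (chS c) (h ▸ hnd.1), hF0]; ring
      · rw [if_neg h, if_neg (fun hh => h hh.symm)]; ring
    simp only [hstep]
    rw [sum_map_add]
    have hbnd : (alphaL.map chS).Nodup := by decide
    rw [alpha_ite_sum alphaL p.1 (fun c => F c p.2) (fun k => G k p.2) hbnd
      (fun c hc => hFG c hc p.2 (hin p List.mem_cons_self))]
    rw [ih hnd.2 (fun q hq => hin q (List.mem_cons_of_mem _ hq))]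
    simp only [List.map_cons, List.sum_cons]
    by_cases h : p.1 ∈ basicS
    · rw [if_pos (show p.1 ∈ List.map chS alphaL from h)]
    · rw [if_neg (show p.1 ∉ List.map chS alphaL from h), hG0 p.1 p.2 h]

theorem F1_nil : F1 [] = 0 := by
  apply List.sum_eq_zero
  intro x hx
  simp only [List.mem_map] at hx
  obtain ⟨k, _, rfl⟩ := hx
  rfl

theorem F2_nil (c : Char) : F2 c [] = 0 := by
  apply List.sum_eq_zero
  intro x hx
  simp only [List.mem_map] at hx
  obtain ⟨k, _, rfl⟩ := hx
  rfl

-- characterization of port A as a pair of alphabet sums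
theorem A_char (ce : List (String × List (String × Int))) :
    get_substitution_errors ce
      = ((alphaL.map (fun c => F1 (dget ce (chS c)))).sum,
         (alphaL.map (fun c => F2 c (dget ce (chS c)))).sum) := by
  unfold get_substitution_errors
  rw [foldl_step_congr (f := _)
      (g := fun (acc : Int × Int) (c : Char) =>
        (acc.1 + F1 (dget ce (chS c)), acc.2 + F2 c (dget ce (chS c))))]
  · rw [pairFold]; simp [alphaL]
  · intro acc c
    cases hg : (PySem.Dict.mk ce).get? (String.ofList [c]) with
    | none =>
      have hd : dget ce (chS c) = [] := by
        simp [dget, PySem.Dict.getD, chS, hg]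
      dsimp only
      rw [hd, F1_nil, F2_nil]
      simp
    | some inner =>
      have hd : dget ce (chS c) = inner := by
        simp [dget, PySem.Dict.getD, chS, hg]
      rw [hd]
      dsimp only
      by_cases he : inner = []
      · subst he
        rw [if_pos rfl, F1_nil, F2_nil]
        simp
      · rw [if_neg he]
        rw [foldl_add_sum]
        simp only [F1, F2, basicS, neighS, chS, List.map_map, Prod.mk.injEq]
        constructor
        · rfl
        · rfl

-- characterization of port B as a pair of entry sums
theorem B_char (ce : List (String × List (String × Int))) :
    get_substitution_errors_alt ce
      = ((ce.map (fun p => if p.1 ∈ basicS then G1 p.2 else 0)).sum,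
         (ce.map (fun p => if p.1 ∈ basicS then G2 p.1 p.2 else 0)).sum) := by
  unfold get_substitution_errors_alt
  rw [foldl_step_congr (f := _)
      (g := fun (acc : Int × Int) (kv : String × List (String × Int)) =>
        (acc.1 + (if kv.1 ∈ basicS then G1 kv.2 else 0),
         acc.2 + (if kv.1 ∈ basicS then G2 kv.1 kv.2 else 0)))]
  · rw [pairFold]; simp
  · intro acc kv
    have hmemb : ∀ x : String,
        (x ∈ PySem.Set.ofList (basic_letters.toList.map (fun c => String.ofList [c]))) ↔ x ∈ basicS := by
      intro x
      rw [PySem.Set.mem_ofList]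
      simp [basicS, alphaL, chS]
    by_cases hb : kv.1 ∈ basicS
    · rw [if_pos ((hmemb kv.1).mpr hb), if_pos hb, if_pos hb]
      have hstep : ∀ (a : Int × Int) (ev : String × Int),
          (if ev.1 ∈ PySem.Set.ofList (basic_letters.toList.map (fun c => String.ofList [c]))
             then a.1 + ev.2 else a.1,
           if ev.1 ∈ PySem.Set.ofList ((substitution_dict.getD kv.1 "").toList.map
               (fun c => String.ofList [c])) then a.2 + ev.2 else a.2)
          = (a.1 + (if ev.1 ∈ basicS then ev.2 else 0),
             a.2 + (if ev.1 ∈ neighS kv.1 then ev.2 else 0)) := by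
        intro a ev
        have hn : (ev.1 ∈ PySem.Set.ofList ((substitution_dict.getD kv.1 "").toList.map
            (fun c => String.ofList [c]))) ↔ ev.1 ∈ neighS kv.1 := by
          rw [PySem.Set.mem_ofList]; simp [neighS, chS]
        by_cases h1 : ev.1 ∈ basicS <;> by_cases h2 : ev.1 ∈ neighS kv.1 <;>
          simp [hmemb, hn, h1, h2]
      rw [foldl_step_congr (f := _) (g := fun (a : Int × Int) (ev : String × Int) =>
        (a.1 + (if ev.1 ∈ basicS then ev.2 else 0), a.2 + (if ev.1 ∈ neighS kv.1 then ev.2 else 0)))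
        (h := hstep)]
      rw [pairFold]
      rfl
    · rw [if_neg (fun hh => hb ((hmemb kv.1).mp hh)), if_neg hb, if_neg hb]
      simp

-- ===== VERDICT (by name: the statement is the Claim_ definition above) =====
theorem get_substitution_errors_spec : Claim_equal_get_substitution_errors := by
  intro ce _hdom hpre
  unfold Spec_get_substitution_errors
  obtain ⟨hnd, hin⟩ := hpre
  rw [A_char, B_char]
  have hbnd : basicS.Nodup := by decide
  have halpha : alphaL = ['a', 'b', 'c', 'd', 'e', 'f', 'g', 'h', 'i', 'j', 'k', 'l', 'm', 'n', 'o', 'p', 'q', 'r', 's', 't', 'u', 'v', 'w', 'x', 'y', 'z'] := by decide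
  have hnei : ∀ c ∈ alphaL, (neighS (chS c)).Nodup := by
    intro c hc
    rw [halpha] at hc
    fin_cases hc <;> decide
  refine Prod.ext ?_ ?_
  · refine main_sum_eq ce (fun _ inner => F1 inner)
      (fun k inner => if k ∈ basicS then G1 inner else 0)
      (fun _ => F1_nil) ?_ (fun k inner hk => if_neg hk) hnd hin
    intro c hc inner hinner
    show F1 inner = if chS c ∈ basicS then G1 inner else 0
    rw [if_pos (show chS c ∈ basicS from List.mem_map_of_mem hc)]
    simp only [F1, G1]
    exact lookup_sum_eq inner basicS hinner hbnd
  · refine main_sum_eq ce (fun c inner => F2 c inner)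
      (fun k inner => if k ∈ basicS then G2 k inner else 0)
      F2_nil ?_ (fun k inner hk => if_neg hk) hnd hin
    intro c hc inner hinner
    show F2 c inner = if chS c ∈ basicS then G2 (chS c) inner else 0
    rw [if_pos (show chS c ∈ basicS from List.mem_map_of_mem hc)]
    simp only [F2, G2]
    exact lookup_sum_eq inner (neighS (chS c)) hinner (hnei c hc)
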